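-- pv_equiv track=rewrite | github.com/4379711/easyrequest | easyrequest/utils/__init__.py | average_number_of_groups
-- ===== SOURCE A (Python) =====
-- def average_number_of_groups(m, n):
--     """
--     Split a data into N parts of approximate size .
--
--     :param m: Total length of data to be split .
--     :param n: Need to be divided into several portions .
--     :return: list ,index +1 that should be split .
--     """
--
--     base_num = m // n
--     over_num = m % n
--
--     result = [base_num for _ in range(n)]
--
--     for i in range(over_num):
--         result[i] = result[i] + 1
--
--     for i in range(n - 1):
--         result[i + 1] = result[i] + result[i + 1]
--
--     return result
-- ===== SOURCE B (Python) =====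
-- def average_number_of_groups(m, n):
--     """
--     Split a data into N parts of approximate size .
--
--     :param m: Total length of data to be split .
--     :param n: Need to be divided into several portions .
--     :return: list ,index +1 that should be split .
--     """
--     base_num, over_num = divmod(m, n)
--     return [(i + 1) * base_num + min(i + 1, over_num) for i in range(n)]
-- ===== Notes on version B (the rewrite author's own statement) =====
-- stated objective: simpler
-- what changed: Replaces A's three passes (build a constant list, bump the first m%n entries, prefix-sum in place) by a single comprehension computing each cumulative boundary with the closed form (i+1)*(m//n) + min(i+1, m%n); no mutable list and no running total.
import Mathlib
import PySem

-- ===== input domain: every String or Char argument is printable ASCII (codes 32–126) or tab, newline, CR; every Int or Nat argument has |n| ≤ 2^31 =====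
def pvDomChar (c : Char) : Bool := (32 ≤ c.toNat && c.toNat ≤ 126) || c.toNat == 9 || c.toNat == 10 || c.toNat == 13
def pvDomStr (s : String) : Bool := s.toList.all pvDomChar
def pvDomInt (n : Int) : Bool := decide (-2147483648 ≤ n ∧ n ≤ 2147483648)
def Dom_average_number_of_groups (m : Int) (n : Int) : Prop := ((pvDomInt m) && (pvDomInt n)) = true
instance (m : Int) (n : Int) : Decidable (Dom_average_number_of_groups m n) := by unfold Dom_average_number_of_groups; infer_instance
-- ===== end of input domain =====

-- B replaces A's three passes (constant init, bump loop, in-place prefix-sum) by one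
-- comprehension with the closed form (i+1)*(m//n) + min(i+1, m%n) per boundary (objective: simpler).

-- ===== PORT A =====
-- literal transliteration of A: init list, bump first over_num entries, prefix-sum loop.
-- All indices the loops touch are nonnegative and in range, so pyGetD/pySetD are exact here.
def average_number_of_groups (m : Int) (n : Int) : List Int :=
  let base_num := PySem.Int.floordiv m n
  let over_num := PySem.Int.mod m n
  let result := (PySem.List.pyRange 0 n 1).map (fun _ => base_num)
  let result := (PySem.List.pyRange 0 over_num 1).foldl
      (fun r i => PySem.List.pySetD r i (PySem.List.pyGetD r i 0 + 1)) result
  (PySem.List.pyRange 0 (n - 1) 1).foldl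
      (fun r i => PySem.List.pySetD r (i + 1)
        (PySem.List.pyGetD r i 0 + PySem.List.pyGetD r (i + 1) 0)) result

-- ===== PORT B =====
def average_number_of_groups_alt (m : Int) (n : Int) : List Int :=
  let base_num := PySem.Int.floordiv m n
  let over_num := PySem.Int.mod m n
  (PySem.List.pyRange 0 n 1).map (fun i => (i + 1) * base_num + min (i + 1) over_num)

-- ===== PRECONDITION & SPEC =====
-- Pre_ excludes exactly n = 0, where A (and B) raise ZeroDivisionError.
def Pre_average_number_of_groups (m : Int) (n : Int) : Prop := n ≠ 0
instance (m : Int) (n : Int) : Decidable (Pre_average_number_of_groups m n) := by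
  unfold Pre_average_number_of_groups; infer_instance
def pvWitness_average_number_of_groups : Int × Int := (7, 3)

def Spec_average_number_of_groups (m : Int) (n : Int) (out : List Int) : Prop := out = average_number_of_groups_alt m n
instance (m : Int) (n : Int) (out : List Int) : Decidable (Spec_average_number_of_groups m n out) := by unfold Spec_average_number_of_groups; infer_instance

-- ===== CLAIM (what is proved, stated in full; the proofs are below) =====
def Claim_equal_average_number_of_groups : Prop := ∀ (m : Int) (n : Int), Dom_average_number_of_groups m n → Pre_average_number_of_groups m n → Spec_average_number_of_groups m n (average_number_of_groups m n)

-- ===== LEMMAS AND PROOFS =====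

-- value of an entry after A's bump loop, and the closed-form cumulative boundary
def pvBumped (b o i : Int) : Int := if i < o then b + 1 else b
def pvClosed (b o i : Int) : Int := (i + 1) * b + min (i + 1) o

-- setting index j (0 ≤ j < n) of a comprehension-shaped list updates the function pointwise
lemma setD_map_pyRange (n : Int) (f : Int → Int) (j v : Int) (h0 : 0 ≤ j) :
    PySem.List.pySetD ((PySem.List.pyRange 0 n 1).map f) j v
      = (PySem.List.pyRange 0 n 1).map (fun i => if i = j then v else f i) := by
  rw [PySem.List.pySetD_of_nonneg _ _ h0]
  apply List.ext_getElem
  · simp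
  · intro k h1 h2
    simp only [List.getElem_set, List.getElem_map, PySem.List.getElem_pyRange_one, zero_add]
    split_ifs with ha hb hb <;> first | rfl | omega

-- A's bump loop: the first c entries get +1
lemma bump_loop (n b : Int) (c : Nat) (hc : (c : Int) ≤ n) :
    (PySem.List.pyRange 0 (c : Int) 1).foldl
        (fun r i => PySem.List.pySetD r i (PySem.List.pyGetD r i 0 + 1))
        ((PySem.List.pyRange 0 n 1).map (fun _ => b))
      = (PySem.List.pyRange 0 n 1).map (pvBumped b (c : Int)) := by
  induction c with
  | zero =>
    simp only [Nat.cast_zero]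
    rw [PySem.List.pyRange_one_eq_nil (a := (0:Int)) (b := (0:Int)) le_rfl]
    simp only [List.foldl_nil]
    apply List.map_congr_left
    intro i hi
    rw [PySem.List.mem_pyRange_one] at hi
    simp only [pvBumped]
    rw [if_neg (by omega)]
  | succ c ih =>
    have hc2 : (c : Int) + 1 ≤ n := by exact_mod_cast hc
    have hc' : (c : Int) ≤ n := by omega
    have hcn : (c : Int) < n := by omega
    rw [show ((c + 1 : Nat) : Int) = (c : Int) + 1 by push_cast; ring,
        PySem.List.pyRange_one_succ_right (by omega), List.foldl_append, ih hc']
    simp only [List.foldl_cons, List.foldl_nil]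
    rw [PySem.List.pyGetD_map_pyRange_of_nonneg _ _ _ _ (by omega) hcn,
        setD_map_pyRange n _ _ _ (by omega)]
    apply List.map_congr_left
    intro i hi
    rw [PySem.List.mem_pyRange_one] at hi
    simp only [pvBumped]
    split_ifs <;> omega

lemma closed_step (b o c : Int) :
    pvClosed b o c + pvBumped b o (c + 1) = pvClosed b o (c + 1) := by
  unfold pvClosed pvBumped
  rw [Int.min_def, Int.min_def]
  split_ifs <;> ring_nf <;> omega

lemma closed_zero (b o : Int) (ho : 0 ≤ o) : pvClosed b o 0 = pvBumped b o 0 := by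
  unfold pvClosed pvBumped
  rw [Int.min_def]
  split_ifs <;> omega

-- A's prefix-sum loop turns the bumped list into the closed-form boundaries up to index c
lemma prefix_loop (n b o : Int) (ho : 0 ≤ o) (c : Nat) (hc : (c : Int) ≤ n - 1) :
    (PySem.List.pyRange 0 (c : Int) 1).foldl
        (fun r i => PySem.List.pySetD r (i + 1)
          (PySem.List.pyGetD r i 0 + PySem.List.pyGetD r (i + 1) 0))
        ((PySem.List.pyRange 0 n 1).map (pvBumped b o))
      = (PySem.List.pyRange 0 n 1).map
          (fun i => if i ≤ (c : Int) then pvClosed b o i else pvBumped b o i) := by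
  induction c with
  | zero =>
    simp only [Nat.cast_zero]
    rw [PySem.List.pyRange_one_eq_nil (a := (0:Int)) (b := (0:Int)) le_rfl]
    simp only [List.foldl_nil]
    apply List.map_congr_left
    intro i hi
    rw [PySem.List.mem_pyRange_one] at hi
    by_cases h : i ≤ (0 : Int)
    · rw [if_pos h, show i = 0 by omega, closed_zero b o ho]
    · rw [if_neg h]
  | succ c ih =>
    have hc2 : (c : Int) + 1 ≤ n - 1 := by exact_mod_cast hc
    have hc' : (c : Int) ≤ n - 1 := by omega
    have hcn : (c : Int) + 1 < n := by omega
    rw [show ((c + 1 : Nat) : Int) = (c : Int) + 1 by push_cast; ring,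
        PySem.List.pyRange_one_succ_right (by omega), List.foldl_append, ih hc']
    simp only [List.foldl_cons, List.foldl_nil]
    rw [PySem.List.pyGetD_map_pyRange_of_nonneg _ _ _ _ (by omega) (by omega),
        PySem.List.pyGetD_map_pyRange_of_nonneg _ _ _ _ (by omega) hcn,
        setD_map_pyRange n _ _ _ (by omega)]
    apply List.map_congr_left
    intro i hi
    rw [PySem.List.mem_pyRange_one] at hi
    by_cases h : i = (c : Int) + 1
    · subst h
      rw [if_pos rfl, if_pos le_rfl, if_neg (show ¬ ((c : Int) + 1 ≤ (c : Int)) by omega),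
          if_pos le_rfl]
      exact closed_step b o (c : Int)
    · rw [if_neg h]
      by_cases h2 : i ≤ (c : Int)
      · rw [if_pos h2, if_pos (show i ≤ (c : Int) + 1 by omega)]
      · rw [if_neg h2, if_neg (show ¬ i ≤ (c : Int) + 1 by omega)]

-- the whole of A equals the whole of B, for positive n, abstracting b = m//n, o = m%n
lemma main_pos (n b o : Int) (hn : 0 < n) (ho : 0 ≤ o) (holt : o < n) :
    (PySem.List.pyRange 0 (n - 1) 1).foldl
        (fun r i => PySem.List.pySetD r (i + 1)
          (PySem.List.pyGetD r i 0 + PySem.List.pyGetD r (i + 1) 0))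
        ((PySem.List.pyRange 0 o 1).foldl
          (fun r i => PySem.List.pySetD r i (PySem.List.pyGetD r i 0 + 1))
          ((PySem.List.pyRange 0 n 1).map (fun _ => b)))
      = (PySem.List.pyRange 0 n 1).map (fun i => (i + 1) * b + min (i + 1) o) := by
  have h1 : ((o.toNat : Nat) : Int) = o := Int.toNat_of_nonneg ho
  have h2 : (((n - 1).toNat : Nat) : Int) = n - 1 := Int.toNat_of_nonneg (by omega)
  rw [← h1, bump_loop n b o.toNat (by omega), ← h2,
      prefix_loop n b ((o.toNat : Nat) : Int) (by omega) (n - 1).toNat (by omega)]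
  apply List.map_congr_left
  intro i hi
  rw [PySem.List.mem_pyRange_one] at hi
  rw [if_pos (by omega)]
  rfl

-- ===== VERDICT (by name: the statement is the Claim_ definition above) =====
theorem average_number_of_groups_spec : Claim_equal_average_number_of_groups := by
  intro m n _ hn
  have hn' : n ≠ 0 := hn
  show average_number_of_groups m n = average_number_of_groups_alt m n
  show (PySem.List.pyRange 0 (n - 1) 1).foldl
        (fun r i => PySem.List.pySetD r (i + 1)
          (PySem.List.pyGetD r i 0 + PySem.List.pyGetD r (i + 1) 0))
        ((PySem.List.pyRange 0 (PySem.Int.mod m n) 1).foldl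
          (fun r i => PySem.List.pySetD r i (PySem.List.pyGetD r i 0 + 1))
          ((PySem.List.pyRange 0 n 1).map (fun _ => PySem.Int.floordiv m n)))
      = (PySem.List.pyRange 0 n 1).map
          (fun i => (i + 1) * PySem.Int.floordiv m n + min (i + 1) (PySem.Int.mod m n))
  rcases lt_or_gt_of_ne hn' with hneg | hpos
  · -- n < 0: every range is empty, both sides are []
    have hob := PySem.Int.mod_neg_bounds m hneg
    rw [PySem.List.pyRange_one_eq_nil (a := (0:Int)) (b := n) (by omega),
        PySem.List.pyRange_one_eq_nil (a := (0:Int)) (b := PySem.Int.mod m n) (by omega),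
        PySem.List.pyRange_one_eq_nil (a := (0:Int)) (b := n - 1) (by omega)]
    simp
  · exact main_pos n (PySem.Int.floordiv m n) (PySem.Int.mod m n) hpos
      (PySem.Int.mod_nonneg m hpos) (PySem.Int.mod_lt m hpos)
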